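-- pv_equiv track=rewrite | github.com/django/django | venv/lib/python3.11/site-packages/sphinx/util/logging.py | is_suppressed_warning
-- ===== SOURCE A (Python) =====
-- def is_suppressed_warning(type: str, subtype: str, suppress_warnings: list[str]) -> bool:
--     """Check whether the warning is suppressed or not."""
--     if type is None:
--         return False
--
--     subtarget: str | None
--
--     for warning_type in suppress_warnings:
--         if '.' in warning_type:
--             target, subtarget = warning_type.split('.', 1)
--         else:
--             target, subtarget = warning_type, None
--
--         if target == type and subtarget in (None, subtype, "*"):
--             return True
--
--     return False
-- ===== SOURCE B (Python) =====
-- def is_suppressed_warning(type: str, subtype: str, suppress_warnings: list[str]) -> bool: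
--     """Check whether the warning is suppressed or not."""
--     if type is None or '.' in type:
--         # a matching entry's part before its first dot can never contain a dot
--         return False
--     candidates = (type, f"{type}.*", f"{type}.{subtype}")
--     return any(c in suppress_warnings for c in candidates)
-- ===== Notes on version B (the rewrite author's own statement) =====
-- stated objective: idiomatic
-- what changed: Instead of splitting every suppress_warnings entry at its first dot and comparing the pieces, B constructs the only three patterns that could match ('type', 'type.*', 'type.subtype') and tests their membership in the list (types containing a dot can never match, so it returns False for them up front).
import Mathlib
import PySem

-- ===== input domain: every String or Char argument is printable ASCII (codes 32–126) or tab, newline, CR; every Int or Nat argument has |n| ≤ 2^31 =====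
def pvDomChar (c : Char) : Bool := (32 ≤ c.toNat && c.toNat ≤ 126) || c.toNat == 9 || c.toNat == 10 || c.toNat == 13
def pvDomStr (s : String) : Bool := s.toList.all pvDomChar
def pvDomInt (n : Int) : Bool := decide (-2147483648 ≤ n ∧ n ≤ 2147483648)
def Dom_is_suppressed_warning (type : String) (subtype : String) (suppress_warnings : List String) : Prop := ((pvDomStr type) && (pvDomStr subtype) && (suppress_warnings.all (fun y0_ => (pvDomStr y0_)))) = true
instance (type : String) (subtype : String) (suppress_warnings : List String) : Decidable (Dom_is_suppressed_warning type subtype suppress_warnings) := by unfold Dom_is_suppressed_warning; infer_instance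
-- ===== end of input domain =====

-- B replaces A's per-entry split-and-compare scan by membership tests of the three
-- patterns that could match ('type', 'type.*', 'type.subtype'); objective: idiomatic.

-- ===== PORT A =====
-- per-entry check of A's loop body: split at the first '.' (Python split('.', 1)),
-- then target == type and subtarget in (None, subtype, "*")
def pvMatchA (type : String) (subtype : String) (w : String) : Bool :=
  if w.toList.contains '.' then
    -- target, subtarget = warning_type.split('.', 1)
    let target := w.toList.takeWhile (fun c => c ≠ '.')
    let subtarget := (w.toList.dropWhile (fun c => c ≠ '.')).tail
    decide (target = type.toList) && (decide (subtarget = subtype.toList) || decide (subtarget = ['*']))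
  else
    -- target, subtarget = warning_type, None; subtarget = None matches
    decide (w.toList = type.toList)

-- `type is None` cannot occur for a String argument, so that guard vanishes;
-- the for-loop with early `return True` is List.any
def is_suppressed_warning (type : String) (subtype : String) (suppress_warnings : List String) : Bool :=
  suppress_warnings.any (fun w => pvMatchA type subtype w)

-- ===== PORT B =====
def is_suppressed_warning_alt (type : String) (subtype : String) (suppress_warnings : List String) : Bool :=
  if type.toList.contains '.' then false
  else
    let candidates : List (List Char) :=
      [type.toList, type.toList ++ ['.', '*'], type.toList ++ '.' :: subtype.toList]
    candidates.any (fun c => suppress_warnings.any (fun w => decide (w.toList = c)))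

-- ===== PRECONDITION & SPEC =====
def Spec_is_suppressed_warning (type : String) (subtype : String) (suppress_warnings : List String) (out : Bool) : Prop := out = is_suppressed_warning_alt type subtype suppress_warnings
instance (type : String) (subtype : String) (suppress_warnings : List String) (out : Bool) : Decidable (Spec_is_suppressed_warning type subtype suppress_warnings out) := by unfold Spec_is_suppressed_warning; infer_instance

-- ===== CLAIM (what is proved, stated in full; the proofs are below) =====
def Claim_equal_is_suppressed_warning : Prop := ∀ (type : String) (subtype : String) (suppress_warnings : List String), Dom_is_suppressed_warning type subtype suppress_warnings → Spec_is_suppressed_warning type subtype suppress_warnings (is_suppressed_warning type subtype suppress_warnings)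

-- ===== LEMMAS AND PROOFS =====

-- a dot-free prefix followed by '.' determines the decomposition uniquely
theorem pv_dot_split_unique (t t' s s' : List Char)
    (ht : '.' ∉ t) (ht' : '.' ∉ t')
    (h : t ++ '.' :: s = t' ++ '.' :: s') : t = t' ∧ s = s' := by
  induction t generalizing t' with
  | nil =>
    cases t' with
    | nil => simpa using h
    | cons a u =>
      simp only [List.nil_append, List.cons_append, List.cons.injEq] at h
      exact absurd (h.1 ▸ List.mem_cons_self) ht'
  | cons a u ih =>
    cases t' with
    | nil =>
      simp only [List.cons_append, List.nil_append, List.cons.injEq] at h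
      exact absurd (h.1 ▸ List.mem_cons_self) ht
    | cons a' u' =>
      simp only [List.cons_append, List.cons.injEq] at h
      have := ih u' (fun hm => ht (List.mem_cons_of_mem _ hm))
        (fun hm => ht' (List.mem_cons_of_mem _ hm)) h.2
      exact ⟨by rw [h.1, this.1], this.2⟩

theorem pv_takeWhile_no_dot (l : List Char) :
    '.' ∉ l.takeWhile (fun c => c ≠ '.') := by
  intro hm
  have := List.mem_takeWhile_imp hm
  simp at this

theorem pv_split_recomb (l : List Char) (h : l.contains '.' = true) :
    l = l.takeWhile (fun c => c ≠ '.') ++ '.' :: (l.dropWhile (fun c => c ≠ '.')).tail := by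
  induction l with
  | nil => simp at h
  | cons a l ih =>
    by_cases ha : a = '.'
    · subst ha; simp [List.takeWhile, List.dropWhile]
    · have h' : l.contains '.' = true := by
        simp only [List.contains_cons] at h
        rcases Bool.or_eq_true_iff.mp h with h1 | h1
        · exact absurd (beq_iff_eq.mp h1).symm ha
        · exact h1
      have := ih h'
      have hpa : decide (a ≠ '.') = true := by simpa using ha
      rw [List.takeWhile_cons, List.dropWhile_cons]
      rw [hpa, if_pos rfl, if_pos rfl, List.cons_append]
      exact congrArg (List.cons a) this

-- per-entry characterisation: A's loop body succeeds iff the entry is one of B's candidates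
-- (and then type itself is dot-free)
theorem pv_match_iff (type subtype w : String) :
    pvMatchA type subtype w = true ↔
      type.toList.contains '.' = false ∧
      (w.toList = type.toList ∨ w.toList = type.toList ++ ['.', '*'] ∨
       w.toList = type.toList ++ '.' :: subtype.toList) := by
  unfold pvMatchA
  by_cases hd : w.toList.contains '.' = true
  · rw [if_pos hd]
    simp only [Bool.and_eq_true, Bool.or_eq_true, decide_eq_true_eq]
    constructor
    · rintro ⟨ht, hs⟩
      have hrec := pv_split_recomb w.toList hd
      have hnd : type.toList.contains '.' = false := by
        by_contra hcon
        simp only [Bool.not_eq_false, List.contains_eq_mem, decide_eq_true_eq] at hcon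
        rw [← ht] at hcon
        exact pv_takeWhile_no_dot _ hcon
      refine ⟨hnd, Or.inr ?_⟩
      rcases hs with hs | hs
      · right; rw [hrec, ht, hs]
      · left; rw [hrec, ht, hs]
    · rintro ⟨hnd, hw⟩
      have hnd' : '.' ∉ type.toList := by simpa using hnd
      rcases hw with hw | hw | hw
      · exfalso; rw [hw] at hd; simp only [List.contains_eq_mem, decide_eq_true_eq] at hd
        exact hnd' hd
      · have heq := hw.symm.trans (pv_split_recomb w.toList hd)
        have := pv_dot_split_unique type.toList _ ['*'] _ hnd'
          (pv_takeWhile_no_dot w.toList) heq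
        exact ⟨this.1.symm, Or.inr this.2.symm⟩
      · have heq := hw.symm.trans (pv_split_recomb w.toList hd)
        have := pv_dot_split_unique type.toList _ subtype.toList _ hnd'
          (pv_takeWhile_no_dot w.toList) heq
        exact ⟨this.1.symm, Or.inl this.2.symm⟩
  · rw [if_neg hd]
    simp only [decide_eq_true_eq]
    constructor
    · intro hw
      have hnd : type.toList.contains '.' = false := by
        rw [← hw]; exact Bool.eq_false_iff.mpr (fun h => hd h)
      exact ⟨hnd, Or.inl hw⟩
    · rintro ⟨hnd, hw | hw | hw⟩
      · exact hw
      all_goals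
        exfalso; apply hd; rw [hw]
        simp [List.contains_eq_mem]
    
-- ===== VERDICT (by name: the statement is the Claim_ definition above) =====
theorem is_suppressed_warning_spec : Claim_equal_is_suppressed_warning := by
  intro type subtype sw _
  unfold Spec_is_suppressed_warning is_suppressed_warning is_suppressed_warning_alt
  by_cases hd : type.toList.contains '.' = true
  · rw [if_pos hd]
    simp only [List.any_eq_false]
    intro w _ hm
    have := (pv_match_iff type subtype w).mp hm
    rw [hd] at this
    exact absurd this.1 (by simp)
  · rw [if_neg hd]
    have hnd : type.toList.contains '.' = false := Bool.eq_false_iff.mpr hd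
    rw [Bool.eq_iff_iff]
    simp only [List.any_eq_true, decide_eq_true_eq]
    constructor
    · rintro ⟨w, hw, hm⟩
      rcases ((pv_match_iff type subtype w).mp hm).2 with h | h | h
      · exact ⟨type.toList, by simp, w, hw, h⟩
      · exact ⟨type.toList ++ ['.', '*'], by simp, w, hw, h⟩
      · exact ⟨type.toList ++ '.' :: subtype.toList, by simp, w, hw, h⟩
    · rintro ⟨c, hc, w, hw, hwc⟩
      refine ⟨w, hw, (pv_match_iff type subtype w).mpr ⟨hnd, ?_⟩⟩
      simp only [List.mem_cons, List.not_mem_nil, or_false] at hc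
      rcases hc with rfl | rfl | rfl
      · exact Or.inl hwc
      · exact Or.inr (Or.inl hwc)
      · exact Or.inr (Or.inr hwc)
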